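-- pv_equiv track=rewrite | github.com/debroucker/remake_60_seconds | src/gestion_vies.py | en_vie
-- ===== SOURCE A (Python) =====
-- def en_vie(dico_vie_personnes) :
-- 	'''
-- 	Retourne True si au moins un des personnages et en vie
--
-- 	:param dico_vie_personnes: la vie de chaque personnes
-- 	:type dico_vie_personnes: dict
-- 	:return: True ou False
-- 	:rtype: bool
-- 	'''
-- 	liste_personnes_en_vie = []
-- 	for e in dico_vie_personnes :
-- 		if dico_vie_personnes[e] <= 0 :
-- 			liste_personnes_en_vie.append('mort')
-- 		else :
-- 			liste_personnes_en_vie.append('vivant')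
-- 	return 'vivant' in liste_personnes_en_vie
-- ===== SOURCE B (Python) =====
-- def en_vie(dico_vie_personnes):
--     '''Retourne True si au moins un des personnages est en vie.'''
--     return any(v > 0 for v in dico_vie_personnes.values())
-- ===== Notes on version B (the rewrite author's own statement) =====
-- stated objective: idiomatic
-- what changed: B drops the 'mort'/'vivant' string list and the final membership scan, short-circuiting over the dict's values with any(v > 0 ...)
import Mathlib
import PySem

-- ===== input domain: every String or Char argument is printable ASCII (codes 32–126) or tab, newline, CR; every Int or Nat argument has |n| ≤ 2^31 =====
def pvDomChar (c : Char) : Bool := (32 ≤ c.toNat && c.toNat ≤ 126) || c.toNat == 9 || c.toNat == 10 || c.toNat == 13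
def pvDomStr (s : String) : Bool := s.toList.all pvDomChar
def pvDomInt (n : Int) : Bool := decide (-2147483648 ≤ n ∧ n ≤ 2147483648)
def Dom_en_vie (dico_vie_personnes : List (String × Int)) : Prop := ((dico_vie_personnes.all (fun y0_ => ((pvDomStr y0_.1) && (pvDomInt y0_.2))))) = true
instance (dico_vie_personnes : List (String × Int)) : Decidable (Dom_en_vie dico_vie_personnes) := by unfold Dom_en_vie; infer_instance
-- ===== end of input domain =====

-- B replaces A's 'mort'/'vivant' string list and the final membership test with one
-- short-circuiting pass over the dict's values (any(v > 0)); objective: idiomatic.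

-- ===== PORT A =====
def en_vie (dico_vie_personnes : List (String × Int)) : Bool :=
  let d := PySem.Dict.ofList dico_vie_personnes
  let liste_personnes_en_vie :=
    d.keys.foldl
      (fun acc e => if d.getD e 0 ≤ 0 then acc ++ ["mort"] else acc ++ ["vivant"])
      ([] : List String)
  liste_personnes_en_vie.contains "vivant"

-- ===== PORT B =====
def en_vie_alt (dico_vie_personnes : List (String × Int)) : Bool :=
  (PySem.Dict.ofList dico_vie_personnes).values.any (fun v => 0 < v)

-- ===== PRECONDITION & SPEC =====
def Spec_en_vie (dico_vie_personnes : List (String × Int)) (out : Bool) : Prop := out = en_vie_alt dico_vie_personnes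
instance (dico_vie_personnes : List (String × Int)) (out : Bool) : Decidable (Spec_en_vie dico_vie_personnes out) := by unfold Spec_en_vie; infer_instance

-- ===== CLAIM (what is proved, stated in full; the proofs are below) =====
def Claim_equal_en_vie : Prop := ∀ (dico_vie_personnes : List (String × Int)), Dom_en_vie dico_vie_personnes → Spec_en_vie dico_vie_personnes (en_vie dico_vie_personnes)

-- ===== LEMMAS AND PROOFS =====

-- pointwise congruence for List.any over the members of the list
theorem any_congr_mem {α : Type} (l : List α) (p q : α → Bool)
    (h : ∀ a ∈ l, p a = q a) : l.any p = l.any q := by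
  induction l with
  | nil => rfl
  | cons x t ih =>
      simp only [List.any_cons, h x (List.mem_cons_self), ih (fun a ha => h a (List.mem_cons_of_mem x ha))]

-- A's accumulator list is a map of its key list.
theorem en_vie_foldl_eq_map (d : PySem.Dict String Int) (ks : List String) (acc : List String) :
    ks.foldl
      (fun acc e => if d.getD e 0 ≤ 0 then acc ++ ["mort"] else acc ++ ["vivant"]) acc
      = acc ++ ks.map (fun e => if d.getD e 0 ≤ 0 then "mort" else "vivant") := by
  induction ks generalizing acc with
  | nil => simp
  | cons k t ih =>
      simp only [List.foldl_cons, List.map_cons]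
      by_cases h : d.getD k 0 ≤ 0 <;> simp [h, ih]

-- 'vivant' is in that map iff some key has a positive life value.
theorem vivant_mem_iff (d : PySem.Dict String Int) (ks : List String) :
    ((ks.map (fun e => if d.getD e 0 ≤ 0 then "mort" else "vivant")).contains "vivant")
      = ks.any (fun e => 0 < d.getD e 0) := by
  induction ks with
  | nil => rfl
  | cons k t ih =>
      simp only [List.map_cons, List.any_cons, ← ih, List.contains_cons]
      by_cases h : d.getD k 0 ≤ 0
      · simp [h, not_lt.mpr h]
      · simp [h, lt_of_not_ge h]

-- Over a dict with unique keys, scanning the keys through getD is scanning the values.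
theorem any_keys_eq_any_values (m : List (String × Int))
    (h : (m.map Prod.fst).Nodup) :
    ((m.map Prod.fst).any (fun k => 0 < (PySem.Dict.mk m).getD k 0))
      = (m.map Prod.snd).any (fun v => 0 < v) := by
  induction m with
  | nil => rfl
  | cons p t ih =>
      obtain ⟨k, v⟩ := p
      simp only [List.map_cons, List.nodup_cons, List.mem_map] at h
      obtain ⟨hk, ht⟩ := h
      simp only [List.map_cons, List.any_cons]
      have hself : (PySem.Dict.mk ((k, v) :: t)).getD k 0 = v := by
        simp [PySem.Dict.getD_eq_get?_getD, PySem.Dict.get?_mk_cons]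
      rw [hself]
      have hcong : ((t.map Prod.fst).any fun k' => decide (0 < (PySem.Dict.mk ((k, v) :: t)).getD k' 0))
          = ((t.map Prod.fst).any fun k' => decide (0 < (PySem.Dict.mk t).getD k' 0)) := by
        apply any_congr_mem
        intro k' hk'
        have hne : k ≠ k' := by
          rintro rfl
          simp only [List.mem_map] at hk'
          obtain ⟨q, hq, hq1⟩ := hk'
          exact hk ⟨q, hq, hq1⟩
        simp [PySem.Dict.getD_eq_get?_getD, PySem.Dict.get?_mk_cons, hne]
      rw [hcong, ih ht]

-- ===== VERDICT (by name: the statement is the Claim_ definition above) =====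
theorem en_vie_spec : Claim_equal_en_vie := by
  intro l _
  unfold Spec_en_vie
  simp only [en_vie, en_vie_alt]
  have hn := PySem.Dict.nodup_keys_ofList l
  generalize PySem.Dict.ofList l = d at *
  obtain ⟨m⟩ := d
  rw [en_vie_foldl_eq_map, List.nil_append, vivant_mem_iff]
  simp only [PySem.Dict.keys_mk, PySem.Dict.values_mk] at *
  exact any_keys_eq_any_values m hn
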